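-- pv_equiv track=rewrite | github.com/Lewislvs/Warehouse_Navigation_System | final_warehouse.py | toPathStr
-- ===== SOURCE A (Python) =====
-- pathStartPoint = (0, 0)  # store where the path starts and ends
--
-- pathEndPoint = (0, 0)
--
-- def combinePath(distance, direction, d, start,  pathStr):
--     x, y = start
--     #generate new start point
--     if direction == 'l':
--         x -= distance
--     elif direction == 'r':
--         x += distance
--     elif direction == 'u':
--         y += distance
--     else:
--         y -= distance
--     pathStr += ("From" + str(start) + "to" + str((x, y)))
--     if d == 'l':
--         pathStr += ", then go left\n"
--     elif d == 'r':
--         pathStr += ", then go right\n"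
--     elif d == 'u':
--         pathStr += ", then go up\n"
--     elif d == 'd':
--         pathStr += ", then go down\n"
--     else:
--         pathStr += ", then stop\n"
--     distance = 1
--     direction = d
--     start = (x, y)
--     return pathStr, start, direction, distance
--
-- def toPathStr(path, idorder):
--     start = pathStartPoint
--     end = pathEndPoint
--     pathStr = ""
--     direction = ''
--     i = 0
--     for m, p in enumerate(path):
--         if not p: #empty path, means two products have the same location.
--             pathStr += "Pick up product(" + idorder[i] +")\n"
--             i += 1
--         else:
--             direction = p[0]
--             distance = 0
--             for n, d in enumerate(p):
--                 if d == direction: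
--                     distance += 1
--                     if n == len(p) - 1:
--                         #end of the path, pick up product
--                         pathStr, start, direction, distance = combinePath(distance, direction, 'p', start,  pathStr)
--                         #end of the whole path, last location is the end point, no need to pick up products
--                         if m != len(path) - 1:
--                             pathStr += "Pick up product(" + idorder[i] +")\n"
--                             i += 1
--                 else:
--                     pathStr, start, direction, distance = combinePath(distance, direction, d, start,  pathStr)
--                     if n == len(p) - 1:
--                         pathStr, start, direction, distance = combinePath(distance, direction, 'p', start,  pathStr)
--                         if m != len(path) - 1:
--                             pathStr += "Pick up product(" + idorder[i] +")\n"
--                             i += 1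
--     return pathStr
-- ===== SOURCE B (Python) =====
-- from itertools import groupby
--
-- _DIRWORD = {'l': 'left', 'r': 'right', 'u': 'up', 'd': 'down'}
--
-- def _step(pos, d, k):
--     x, y = pos
--     if d == 'l':
--         return (x - k, y)
--     if d == 'r':
--         return (x + k, y)
--     if d == 'u':
--         return (x, y + k)
--     return (x, y - k)
--
-- def toPathStr(path, idorder):
--     out = []
--     pos = (0, 0)
--     i = 0
--     last = len(path) - 1
--     for m, p in enumerate(path):
--         runs = [(g, len(list(grp))) for g, grp in groupby(p)]
--         for j, (g, k) in enumerate(runs):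
--             new = _step(pos, g, k)
--             nxt = runs[j + 1][0] if j + 1 < len(runs) else 'p'
--             word = _DIRWORD.get(nxt)
--             tail = ", then go %s\n" % word if word else ", then stop\n"
--             out.append("From%sto%s%s" % (pos, new, tail))
--             pos = new
--         if not p or m != last:
--             out.append("Pick up product(%s)\n" % idorder[i])
--             i += 1
--     return "".join(out)
-- ===== Notes on version B (the rewrite author's own statement) =====
-- stated objective: alternative
-- what changed: B first computes the maximal runs of each path with itertools.groupby and then emits one segment per run (announcing the next run's direction via a word table, or stop for the last), collecting pieces in a list joined at the end, instead of A's per-character state machine that threads (direction, distance, pathStr) through nested loops and a combinePath helper.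
import Mathlib
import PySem

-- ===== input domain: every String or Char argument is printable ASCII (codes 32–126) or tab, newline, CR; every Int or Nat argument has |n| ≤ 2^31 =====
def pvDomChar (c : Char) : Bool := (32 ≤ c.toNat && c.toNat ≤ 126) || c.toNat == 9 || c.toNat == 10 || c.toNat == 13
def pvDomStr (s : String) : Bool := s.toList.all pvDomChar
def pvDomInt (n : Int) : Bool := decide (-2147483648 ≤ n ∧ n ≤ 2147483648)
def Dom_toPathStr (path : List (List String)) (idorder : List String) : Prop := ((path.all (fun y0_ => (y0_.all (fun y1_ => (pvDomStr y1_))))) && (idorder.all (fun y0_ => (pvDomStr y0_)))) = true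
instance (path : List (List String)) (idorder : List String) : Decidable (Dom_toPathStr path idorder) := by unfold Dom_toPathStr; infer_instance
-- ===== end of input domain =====

-- B replaces A's per-character state machine by a groupby-into-runs pass with lookahead; same cost, different decomposition.

-- str((x, y)) for a pair of ints
def pvTup (p : Int × Int) : String :=
  "(" ++ PySem.Int.toStr p.1 ++ ", " ++ PySem.Int.toStr p.2 ++ ")"

-- ===== PORT A =====
def combinePath (distance : Int) (direction d : String) (start : Int × Int) (pathStr : String) :
    String × (Int × Int) × String × Int :=
  let xy :=
    if direction = "l" then (start.1 - distance, start.2)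
    else if direction = "r" then (start.1 + distance, start.2)
    else if direction = "u" then (start.1, start.2 + distance)
    else (start.1, start.2 - distance)
  let pathStr := pathStr ++ ("From" ++ pvTup start ++ "to" ++ pvTup xy)
  let pathStr := pathStr ++
    (if d = "l" then ", then go left\n"
     else if d = "r" then ", then go right\n"
     else if d = "u" then ", then go up\n"
     else if d = "d" then ", then go down\n"
     else ", then stop\n")
  (pathStr, xy, d, 1)

-- inner 'for n, d in enumerate(p)' loop of A; 'n == len(p) - 1' is 'rest = []'
def pvInnerA (idorder : List String) (isLastPath : Bool) :
    List String → String → (Int × Int) → String → Int → Nat → String × (Int × Int) × Nat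
  | [], pathStr, start, _, _, i => (pathStr, start, i)
  | d :: rest, pathStr, start, direction, distance, i =>
    if d = direction then
      let distance := distance + 1
      if rest = [] then
        let (s, st, _, _) := combinePath distance direction "p" start pathStr
        if isLastPath then (s, st, i)
        else (s ++ "Pick up product(" ++ ((PySem.List.pyGet? idorder (i : Int)).getD "") ++ ")\n", st, i + 1)
      else pvInnerA idorder isLastPath rest pathStr start direction distance i
    else
      let (s, st, dir2, dist2) := combinePath distance direction d start pathStr
      if rest = [] then
        let (s2, st2, _, _) := combinePath dist2 dir2 "p" st s
        if isLastPath then (s2, st2, i)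
        else (s2 ++ "Pick up product(" ++ ((PySem.List.pyGet? idorder (i : Int)).getD "") ++ ")\n", st2, i + 1)
      else pvInnerA idorder isLastPath rest s st dir2 dist2 i

-- outer 'for m, p in enumerate(path)' loop of A; 'm != len(path) - 1' is 'rest ≠ []'
def pvOuterA (idorder : List String) : List (List String) → String → (Int × Int) → Nat → String
  | [], pathStr, _, _ => pathStr
  | p :: rest, pathStr, start, i =>
    if p = [] then
      pvOuterA idorder rest
        (pathStr ++ "Pick up product(" ++ ((PySem.List.pyGet? idorder (i : Int)).getD "") ++ ")\n")
        start (i + 1)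
    else
      let (s, st, i') := pvInnerA idorder (rest = []) p pathStr start (p.headD "") 0 i
      pvOuterA idorder rest s st i'

def toPathStr (path : List (List String)) (idorder : List String) : String :=
  pvOuterA idorder path "" (0, 0) 0

-- ===== PORT B =====
-- itertools.groupby(p) as (direction, run-length) pairs
def pvRunsAux (d : String) (k : Nat) : List String → List (String × Nat)
  | [] => [(d, k)]
  | x :: xs => if x = d then pvRunsAux d (k + 1) xs else (d, k) :: pvRunsAux x 1 xs

def pvRunsOf : List String → List (String × Nat)
  | [] => []
  | x :: xs => pvRunsAux x 1 xs

def pvStep (pos : Int × Int) (d : String) (k : Int) : Int × Int :=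
  if d = "l" then (pos.1 - k, pos.2)
  else if d = "r" then (pos.1 + k, pos.2)
  else if d = "u" then (pos.1, pos.2 + k)
  else (pos.1, pos.2 - k)

def pvDirWord? (d : String) : Option String :=
  if d = "l" then some "left" else if d = "r" then some "right"
  else if d = "u" then some "up" else if d = "d" then some "down" else none

-- the 'for j, (g, k) in enumerate(runs)' loop: one segment string per run, plus the final position
def pvSegsB (pos : Int × Int) : List (String × Nat) → List String × (Int × Int)
  | [] => ([], pos)
  | (g, k) :: rest =>
    let new := pvStep pos g (k : Int)
    let nxt := match rest with | [] => "p" | (g2, _) :: _ => g2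
    let tail := match pvDirWord? nxt with
      | some w => ", then go " ++ w ++ "\n"
      | none => ", then stop\n"
    let r := pvSegsB new rest
    (("From" ++ pvTup pos ++ "to" ++ pvTup new ++ tail) :: r.1, r.2)

def pvOuterB (idorder : List String) : List (List String) → (Int × Int) → Nat → List String
  | [], _, _ => []
  | p :: rest, pos, i =>
    let sp := pvSegsB pos (pvRunsOf p)
    if p = [] ∨ rest ≠ [] then
      sp.1 ++ ("Pick up product(" ++ ((PySem.List.pyGet? idorder (i : Int)).getD "") ++ ")\n")
        :: pvOuterB idorder rest sp.2 (i + 1)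
    else sp.1 ++ pvOuterB idorder rest sp.2 i

def toPathStr_alt (path : List (List String)) (idorder : List String) : String :=
  String.join (pvOuterB idorder path (0, 0) 0)

-- ===== PRECONDITION & SPEC =====
-- Pre_ excludes exactly the inputs where A raises IndexError: every path entry triggers a
-- product pickup except a nonempty last entry, so A indexes idorder that many times.
def Pre_toPathStr (path : List (List String)) (idorder : List String) : Prop :=
  (match path.getLast? with
   | none => 0
   | some p => if p = [] then path.length else path.length - 1) ≤ idorder.length
instance (path : List (List String)) (idorder : List String) : Decidable (Pre_toPathStr path idorder) := by
  unfold Pre_toPathStr; infer_instance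

def pvWitness_toPathStr : List (List String) × List String := ([["r", "r", "u"], ["l"]], ["a7"])

def Spec_toPathStr (path : List (List String)) (idorder : List String) (out : String) : Prop := out = toPathStr_alt path idorder
instance (path : List (List String)) (idorder : List String) (out : String) : Decidable (Spec_toPathStr path idorder out) := by unfold Spec_toPathStr; infer_instance

-- ===== CLAIM (what is proved, stated in full; the proofs are below) =====
def Claim_equal_toPathStr : Prop := ∀ (path : List (List String)) (idorder : List String), Dom_toPathStr path idorder → Pre_toPathStr path idorder → Spec_toPathStr path idorder (toPathStr path idorder)

-- ===== LEMMAS AND PROOFS =====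

theorem pvFoldl_append (l : List String) : ∀ a : String, l.foldl (· ++ ·) a = a ++ l.foldl (· ++ ·) "" := by
  induction l with
  | nil => intro a; simp
  | cons x xs ih =>
    intro a
    simp only [List.foldl_cons]
    rw [ih (a ++ x), ih ("" ++ x)]
    simp [String.append_assoc]

theorem pvJoin_cons (a : String) (l : List String) : String.join (a :: l) = a ++ String.join l := by
  simp only [String.join, List.foldl_cons]
  rw [pvFoldl_append l ("" ++ a)]
  simp

-- the head run produced by pvRunsAux carries the seed direction
theorem pvRunsAux_head (d : String) (k : Nat) (l : List String) :
    ∃ k' t, pvRunsAux d k l = (d, k') :: t := by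
  induction l generalizing k with
  | nil => exact ⟨k, [], rfl⟩
  | cons x xs ih =>
    by_cases h : x = d
    · subst h
      obtain ⟨k', t, ht⟩ := ih (k + 1)
      exact ⟨k', t, by simp [pvRunsAux, ht]⟩
    · exact ⟨k, pvRunsAux x 1 xs, by simp [pvRunsAux, h]⟩

-- A's movement if-chain equals B's pvStep
theorem pvMove_eq (dir : String) (pos : Int × Int) (dist : Int) :
    (if dir = "l" then (pos.1 - dist, pos.2)
     else if dir = "r" then (pos.1 + dist, pos.2)
     else if dir = "u" then (pos.1, pos.2 + dist)
     else (pos.1, pos.2 - dist)) = pvStep pos dir dist := by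
  simp [pvStep]

-- A's announcement if-chain equals B's word-table tail
theorem pvTail_eq (d : String) :
    (if d = "l" then ", then go left\n"
     else if d = "r" then ", then go right\n"
     else if d = "u" then ", then go up\n"
     else if d = "d" then ", then go down\n"
     else ", then stop\n") =
    (match pvDirWord? d with
     | some w => ", then go " ++ w ++ "\n"
     | none => ", then stop\n") := by
  unfold pvDirWord?
  split_ifs <;> rfl

def pvTail (d : String) : String :=
  match pvDirWord? d with
  | some w => ", then go " ++ w ++ "\n"
  | none => ", then stop\n"

-- combinePath, restated through B's helpers
theorem pvCombine_eq (dist : Int) (dir d : String) (pos : Int × Int) (s : String) :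
    combinePath dist dir d pos s =
      (s ++ ("From" ++ pvTup pos ++ "to" ++ pvTup (pvStep pos dir dist) ++ pvTail d),
       pvStep pos dir dist, d, 1) := by
  unfold combinePath pvTail
  rw [pvMove_eq, pvTail_eq]
  simp [String.append_assoc]

theorem pvJoin_nil : String.join ([] : List String) = "" := rfl

theorem pvJoin_append (l1 l2 : List String) : String.join (l1 ++ l2) = String.join l1 ++ String.join l2 := by
  induction l1 with
  | nil => simp [String.join]
  | cons x xs ih => simp only [List.cons_append, pvJoin_cons, ih, String.append_assoc]

def pvPick (idorder : List String) (i : Nat) : String :=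
  "Pick up product(" ++ ((PySem.List.pyGet? idorder (i : Int)).getD "") ++ ")\n"

-- core: A's inner character loop computes exactly B's run segments
theorem pvInner_eq (idorder : List String) (isLast : Bool) :
    ∀ (xs : List String) (d dir : String) (dist : Nat) (pos : Int × Int) (s : String) (i : Nat),
      pvInnerA idorder isLast (d :: xs) s pos dir (dist : Int) i =
        ( s ++ String.join (pvSegsB pos (pvRunsAux dir dist (d :: xs))).1
            ++ (if isLast then "" else pvPick idorder i),
          (pvSegsB pos (pvRunsAux dir dist (d :: xs))).2,
          if isLast then i else i + 1 ) := by
  intro xs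
  induction xs with
  | nil =>
    intro d dir dist pos s i
    by_cases h : d = dir
    · subst h
      have hc : (dist : Int) + 1 = ((dist + 1 : Nat) : Int) := by push_cast; ring
      rw [pvInnerA]
      simp only [pvCombine_eq, hc]
      have hr : pvRunsAux d dist [d] = [(d, dist + 1)] := by rw [pvRunsAux]; simp [pvRunsAux]
      rw [hr]
      cases isLast <;>
        simp [pvSegsB, pvJoin_cons, pvJoin_nil, pvTail, pvPick, String.append_assoc]
    · have hr : pvRunsAux dir dist [d] = [(dir, dist), (d, 1)] := by
        rw [pvRunsAux]; simp [pvRunsAux, h]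
      rw [pvInnerA]
      simp only [if_neg h, pvCombine_eq, hr]
      cases isLast <;>
        simp [pvSegsB, pvJoin_cons, pvJoin_nil, pvTail, pvPick, String.append_assoc]
  | cons x xs ih =>
    intro d dir dist pos s i
    by_cases h : d = dir
    · subst h
      have hc : (dist : Int) + 1 = ((dist + 1 : Nat) : Int) := by push_cast; ring
      rw [pvInnerA, if_pos (rfl : d = d), if_neg (List.cons_ne_nil x xs)]
      rw [hc, ih x d (dist + 1) pos s i]
      have hr : pvRunsAux d dist (d :: x :: xs) = pvRunsAux d (dist + 1) (x :: xs) := by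
        rw [pvRunsAux]; simp
      rw [hr]
    · obtain ⟨k', t, ht⟩ := pvRunsAux_head d 1 (x :: xs)
      rw [pvInnerA, if_neg h]
      simp only [pvCombine_eq]
      rw [if_neg (List.cons_ne_nil x xs)]
      have hc : (1 : Int) = ((1 : Nat) : Int) := by simp
      rw [hc, ih x d 1 (pvStep pos dir (dist : Int)) _ i]
      have hr : pvRunsAux dir dist (d :: x :: xs) = (dir, dist) :: pvRunsAux d 1 (x :: xs) := by
        rw [pvRunsAux]; simp [h]
      rw [hr, ht, ← ht]
      cases isLast <;>
        simp [pvSegsB, ht, pvJoin_cons, pvTail, String.append_assoc]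

theorem pvOuter_eq (idorder : List String) :
    ∀ (path : List (List String)) (s : String) (pos : Int × Int) (i : Nat),
      pvOuterA idorder path s pos i = s ++ String.join (pvOuterB idorder path pos i) := by
  intro path
  induction path with
  | nil => intro s pos i; simp [pvOuterA, pvOuterB, String.join]
  | cons p rest ih =>
    intro s pos i
    by_cases hp : p = []
    · subst hp
      rw [pvOuterA, pvOuterB]
      simp [pvRunsOf, pvSegsB, ih, pvJoin_cons, String.append_assoc]
    · obtain ⟨d, ds, rfl⟩ := List.exists_cons_of_ne_nil hp
      have h0 : (0 : Int) = ((0 : Nat) : Int) := by simp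
      have hr : pvRunsAux d 0 (d :: ds) = pvRunsOf (d :: ds) := by
        rw [pvRunsAux, pvRunsOf]; simp
      rw [pvOuterA, pvOuterB]
      simp only [if_neg (List.cons_ne_nil d ds), List.headD_cons]
      rw [h0, pvInner_eq idorder _ ds d d 0 pos s i, hr]
      by_cases hrest : rest = []
      · subst hrest
        simp [pvOuterA, pvOuterB, String.join]
      · have hb : decide (rest = []) = false := by simp [hrest]
        rw [hb]
        simp only [Bool.false_eq_true, if_false]
        rw [ih]
        simp [hrest, pvJoin_append, pvJoin_cons, pvPick, String.append_assoc]

-- ===== VERDICT (by name: the statement is the Claim_ definition above) =====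
theorem toPathStr_spec : Claim_equal_toPathStr := by
  intro path idorder _ _
  unfold Spec_toPathStr toPathStr toPathStr_alt
  simp [pvOuter_eq]
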